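-- pv_equiv track=rewrite | github.com/xkonjin/writing-improver | src/agents/bottom_up_megaswarm.py | group_mechanisms
-- ===== SOURCE A (Python) =====
-- from typing import List, Dict, Any
--
-- def group_mechanisms(mechanisms: List[str]) -> Dict:
--     """Group mechanisms by type."""
--
--     grouped = {
--         "inversions": [],
--         "thresholds": [],
--         "hidden": [],
--         "cascades": []
--     }
--
--     for m in mechanisms:
--         if "invert" in m.lower() or "correlat" in m.lower():
--             grouped["inversions"].append(m)
--         elif "threshold" in m.lower() or "%" in m:
--             grouped["thresholds"].append(m)
--         elif "hidden" in m.lower() or "accumulation" in m.lower():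
--             grouped["hidden"].append(m)
--         else:
--             grouped["cascades"].append(m)
--
--     return grouped
-- ===== SOURCE B (Python) =====
-- from typing import List, Dict, Any
--
-- CATEGORIES = ("inversions", "thresholds", "hidden", "cascades")
--
-- def _category(m: str) -> str:
--     ml = m.lower()
--     if "invert" in ml or "correlat" in ml:
--         return "inversions"
--     if "threshold" in ml or "%" in m:
--         return "thresholds"
--     if "hidden" in ml or "accumulation" in ml:
--         return "hidden"
--     return "cascades"
--
-- def group_mechanisms(mechanisms: List[str]) -> Dict:
--     """Group mechanisms by type."""
--     return {cat: [m for m in mechanisms if _category(m) == cat]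
--             for cat in CATEGORIES}
-- ===== Notes on version B (the rewrite author's own statement) =====
-- stated objective: alternative
-- what changed: Replaced the single-pass if/elif loop appending into a pre-built dict by a classifier helper plus a dict comprehension that builds each category with its own filter pass over the input.
import Mathlib
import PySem

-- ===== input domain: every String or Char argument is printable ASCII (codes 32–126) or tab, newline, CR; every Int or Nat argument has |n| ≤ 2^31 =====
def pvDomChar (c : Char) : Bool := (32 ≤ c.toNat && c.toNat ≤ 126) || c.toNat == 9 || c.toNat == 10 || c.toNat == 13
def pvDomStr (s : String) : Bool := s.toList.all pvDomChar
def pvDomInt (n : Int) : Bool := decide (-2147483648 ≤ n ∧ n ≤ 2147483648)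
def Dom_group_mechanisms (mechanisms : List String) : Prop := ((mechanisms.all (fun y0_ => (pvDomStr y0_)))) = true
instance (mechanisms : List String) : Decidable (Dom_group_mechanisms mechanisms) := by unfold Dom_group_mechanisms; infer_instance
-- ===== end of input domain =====

-- B replaces A's one-pass if/elif append loop by a classifier + per-category filter passes (objective: alternative decomposition).

-- ===== PORT A =====
def group_mechanisms (mechanisms : List String) : List (String × List String) :=
  (mechanisms.foldl (fun g m =>
    if PySem.Str.isIn "invert" (PySem.Str.lower m) || PySem.Str.isIn "correlat" (PySem.Str.lower m) then
      g.modify "inversions" [] (· ++ [m])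
    else if PySem.Str.isIn "threshold" (PySem.Str.lower m) || PySem.Str.isIn "%" m then
      g.modify "thresholds" [] (· ++ [m])
    else if PySem.Str.isIn "hidden" (PySem.Str.lower m) || PySem.Str.isIn "accumulation" (PySem.Str.lower m) then
      g.modify "hidden" [] (· ++ [m])
    else
      g.modify "cascades" [] (· ++ [m]))
    (PySem.Dict.ofList [("inversions", []), ("thresholds", []), ("hidden", []), ("cascades", [])])).items

-- ===== PORT B =====
def pvCategory (m : String) : String :=
  let ml := PySem.Str.lower m
  if PySem.Str.isIn "invert" ml || PySem.Str.isIn "correlat" ml then "inversions"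
  else if PySem.Str.isIn "threshold" ml || PySem.Str.isIn "%" m then "thresholds"
  else if PySem.Str.isIn "hidden" ml || PySem.Str.isIn "accumulation" ml then "hidden"
  else "cascades"

def group_mechanisms_alt (mechanisms : List String) : List (String × List String) :=
  ["inversions", "thresholds", "hidden", "cascades"].map
    (fun cat => (cat, mechanisms.filter (fun m => pvCategory m == cat)))

-- ===== PRECONDITION & SPEC =====
def Spec_group_mechanisms (mechanisms : List String) (out : List (String × List String)) : Prop := out = group_mechanisms_alt mechanisms
instance (mechanisms : List String) (out : List (String × List String)) : Decidable (Spec_group_mechanisms mechanisms out) := by unfold Spec_group_mechanisms; infer_instance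

-- ===== CLAIM (what is proved, stated in full; the proofs are below) =====
def Claim_equal_group_mechanisms : Prop := ∀ (mechanisms : List String), Dom_group_mechanisms mechanisms → Spec_group_mechanisms mechanisms (group_mechanisms mechanisms)

-- ===== LEMMAS AND PROOFS =====

-- the loop of A, over a dict holding the four category lists, computed in closed form via B's classifier
theorem pv_loop (l : List String) (a b c e : List String) :
    l.foldl (fun g m =>
      if PySem.Str.isIn "invert" (PySem.Str.lower m) || PySem.Str.isIn "correlat" (PySem.Str.lower m) then
        g.modify "inversions" [] (· ++ [m])
      else if PySem.Str.isIn "threshold" (PySem.Str.lower m) || PySem.Str.isIn "%" m then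
        g.modify "thresholds" [] (· ++ [m])
      else if PySem.Str.isIn "hidden" (PySem.Str.lower m) || PySem.Str.isIn "accumulation" (PySem.Str.lower m) then
        g.modify "hidden" [] (· ++ [m])
      else
        g.modify "cascades" [] (· ++ [m]))
      (PySem.Dict.mk [("inversions", a), ("thresholds", b), ("hidden", c), ("cascades", e)]) =
    PySem.Dict.mk [("inversions", a ++ l.filter (fun m => pvCategory m == "inversions")),
                   ("thresholds", b ++ l.filter (fun m => pvCategory m == "thresholds")),
                   ("hidden", c ++ l.filter (fun m => pvCategory m == "hidden")),
                   ("cascades", e ++ l.filter (fun m => pvCategory m == "cascades"))] := by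
  induction l generalizing a b c e with
  | nil => simp
  | cons m l ih =>
    by_cases h1 : (PySem.Str.isIn "invert" (PySem.Str.lower m) || PySem.Str.isIn "correlat" (PySem.Str.lower m)) = true
    · simp only [List.foldl_cons, if_pos h1]
      rw [show (PySem.Dict.mk [("inversions", a), ("thresholds", b), ("hidden", c), ("cascades", e)]).modify "inversions" [] (· ++ [m]) =
            PySem.Dict.mk [("inversions", a ++ [m]), ("thresholds", b), ("hidden", c), ("cascades", e)] from rfl]
      rw [ih]
      have hcat : pvCategory m = "inversions" := by simp only [pvCategory]; rw [if_pos h1]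
      simp [hcat]
    · by_cases h2 : (PySem.Str.isIn "threshold" (PySem.Str.lower m) || PySem.Str.isIn "%" m) = true
      · simp only [List.foldl_cons, if_neg h1, if_pos h2]
        rw [show (PySem.Dict.mk [("inversions", a), ("thresholds", b), ("hidden", c), ("cascades", e)]).modify "thresholds" [] (· ++ [m]) =
              PySem.Dict.mk [("inversions", a), ("thresholds", b ++ [m]), ("hidden", c), ("cascades", e)] from rfl]
        rw [ih]
        have hcat : pvCategory m = "thresholds" := by simp only [pvCategory]; rw [if_neg h1, if_pos h2]
        simp [hcat]
      · by_cases h3 : (PySem.Str.isIn "hidden" (PySem.Str.lower m) || PySem.Str.isIn "accumulation" (PySem.Str.lower m)) = true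
        · simp only [List.foldl_cons, if_neg h1, if_neg h2, if_pos h3]
          rw [show (PySem.Dict.mk [("inversions", a), ("thresholds", b), ("hidden", c), ("cascades", e)]).modify "hidden" [] (· ++ [m]) =
                PySem.Dict.mk [("inversions", a), ("thresholds", b), ("hidden", c ++ [m]), ("cascades", e)] from rfl]
          rw [ih]
          have hcat : pvCategory m = "hidden" := by simp only [pvCategory]; rw [if_neg h1, if_neg h2, if_pos h3]
          simp [hcat]
        · simp only [List.foldl_cons, if_neg h1, if_neg h2, if_neg h3]
          rw [show (PySem.Dict.mk [("inversions", a), ("thresholds", b), ("hidden", c), ("cascades", e)]).modify "cascades" [] (· ++ [m]) =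
                PySem.Dict.mk [("inversions", a), ("thresholds", b), ("hidden", c), ("cascades", e ++ [m])] from rfl]
          rw [ih]
          have hcat : pvCategory m = "cascades" := by simp only [pvCategory]; rw [if_neg h1, if_neg h2, if_neg h3]
          simp [hcat]

-- ===== VERDICT (by name: the statement is the Claim_ definition above) =====
theorem group_mechanisms_spec : Claim_equal_group_mechanisms := by
  intro mechanisms _
  unfold Spec_group_mechanisms group_mechanisms group_mechanisms_alt
  rw [show (PySem.Dict.ofList [("inversions", ([] : List String)), ("thresholds", []), ("hidden", []), ("cascades", [])]) =
        PySem.Dict.mk [("inversions", []), ("thresholds", []), ("hidden", []), ("cascades", [])] from rfl]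
  rw [pv_loop]
  simp
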